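-- pv_equiv track=rewrite | github.com/aditya-raj9125/Sanskrit-Env | baseline.py | match_to_option
-- ===== SOURCE A (Python) =====
-- def match_to_option(text, candidate_options):
--     """Match response text to the closest candidate option."""
--     text_clean = text.strip()
--     # Exact match
--     for opt in candidate_options:
--         if text_clean == opt:
--             return opt
--     # Prefix match
--     for opt in candidate_options:
--         if opt.startswith(text_clean) or text_clean.startswith(opt):
--             return opt
--     # Substring match
--     for opt in candidate_options:
--         if text_clean.lower() in opt.lower() or opt.lower() in text_clean.lower():
--             return opt
--     return candidate_options[0] if candidate_options else text_clean
-- ===== SOURCE B (Python) =====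
-- def match_to_option(text, candidate_options):
--     """Match response text to the closest candidate option (single pass over tiers)."""
--     text_clean = text.strip()
--     tl = text_clean.lower()
--
--     def tier(opt):
--         if text_clean == opt:
--             return 0
--         if opt.startswith(text_clean) or text_clean.startswith(opt):
--             return 1
--         ol = opt.lower()
--         if tl in ol or ol in tl:
--             return 2
--         return 3
--
--     best = None
--     best_tier = 4
--     for opt in candidate_options:
--         k = tier(opt)
--         if k < best_tier:
--             best, best_tier = opt, k
--             if k == 0:
--                 break
--     return best if best is not None else text_clean
-- ===== Notes on version B (the rewrite author's own statement) =====
-- stated objective: alternative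
-- what changed: Replaced A's three sequential scans (exact, then prefix, then substring) plus a head fallback by a single pass that assigns each option a priority tier (0 exact, 1 prefix, 2 substring, 3 none) and keeps the earliest option of the strictly lowest tier, breaking early on an exact hit.
import Mathlib
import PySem

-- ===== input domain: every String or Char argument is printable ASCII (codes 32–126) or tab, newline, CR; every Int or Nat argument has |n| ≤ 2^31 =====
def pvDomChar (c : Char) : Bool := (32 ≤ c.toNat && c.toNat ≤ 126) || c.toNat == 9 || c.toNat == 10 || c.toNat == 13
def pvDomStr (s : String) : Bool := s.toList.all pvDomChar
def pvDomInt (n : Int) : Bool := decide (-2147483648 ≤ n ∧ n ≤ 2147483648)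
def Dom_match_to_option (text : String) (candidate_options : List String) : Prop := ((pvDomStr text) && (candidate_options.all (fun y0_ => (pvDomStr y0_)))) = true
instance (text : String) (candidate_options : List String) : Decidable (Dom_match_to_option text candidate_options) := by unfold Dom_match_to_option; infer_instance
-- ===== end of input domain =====

-- B replaces A's three sequential scans by one pass that ranks each option by a priority tier;
-- same cost, different structure (objective "alternative").

-- ===== PORT A =====
-- A: three first-match scans (exact, prefix either way, lowercased substring either way), then head-or-text fallback.
def match_to_option (text : String) (candidate_options : List String) : String :=
  let text_clean := PySem.Str.strip text
  match candidate_options.find? (fun opt => text_clean == opt) with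
  | some opt => opt
  | none =>
    match candidate_options.find? (fun opt =>
        PySem.Str.startswith opt text_clean || PySem.Str.startswith text_clean opt) with
    | some opt => opt
    | none =>
      match candidate_options.find? (fun opt =>
          PySem.Str.isIn (PySem.Str.lower text_clean) (PySem.Str.lower opt) ||
          PySem.Str.isIn (PySem.Str.lower opt) (PySem.Str.lower text_clean)) with
      | some opt => opt
      | none =>
        match candidate_options with
        | [] => text_clean
        | opt :: _ => opt

-- ===== PORT B =====
-- B's helper `tier(opt)` (the local `ol` is inlined): 0 exact, 1 prefix, 2 substring, 3 none.
def altTier (text_clean tl opt : String) : Nat :=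
  if text_clean == opt then 0
  else if PySem.Str.startswith opt text_clean || PySem.Str.startswith text_clean opt then 1
  else if PySem.Str.isIn tl (PySem.Str.lower opt) || PySem.Str.isIn (PySem.Str.lower opt) tl then 2
  else 3

-- B's single `for` loop: running best (option, tier), strict improvement only, early break on tier 0.
def altLoop (text_clean tl : String) (opts : List String) (best : Option String) (best_tier : Nat) : String :=
  match opts with
  | [] => best.getD text_clean
  | opt :: rest =>
    let k := altTier text_clean tl opt
    if k < best_tier then
      if k == 0 then opt else altLoop text_clean tl rest (some opt) k
    else altLoop text_clean tl rest best best_tier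

def match_to_option_alt (text : String) (candidate_options : List String) : String :=
  let text_clean := PySem.Str.strip text
  let tl := PySem.Str.lower text_clean
  altLoop text_clean tl candidate_options none 4

-- ===== PRECONDITION & SPEC =====
def Spec_match_to_option (text : String) (candidate_options : List String) (out : String) : Prop := out = match_to_option_alt text candidate_options
instance (text : String) (candidate_options : List String) (out : String) : Decidable (Spec_match_to_option text candidate_options out) := by unfold Spec_match_to_option; infer_instance

-- ===== CLAIM (what is proved, stated in full; the proofs are below) =====
def Claim_equal_match_to_option : Prop := ∀ (text : String) (candidate_options : List String), Dom_match_to_option text candidate_options → Spec_match_to_option text candidate_options (match_to_option text candidate_options)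

-- ===== LEMMAS AND PROOFS =====

-- first option of tier ≤ j
def auxFind (tc tl : String) (j : Nat) (opts : List String) : Option String :=
  opts.find? (fun o => decide (altTier tc tl o ≤ j))

-- cascade: first option of tier ≤ 0, else of tier ≤ 1, …, else of tier ≤ bt-1
def casc (tc tl : String) : Nat → List String → Option String
  | 0, _ => none
  | j + 1, opts => (casc tc tl j opts).orElse (fun _ => auxFind tc tl j opts)

theorem casc_nil (tc tl : String) (bt : Nat) : casc tc tl bt [] = none := by
  induction bt with
  | zero => rfl
  | succ j ih => simp [casc, auxFind, ih, Option.orElse]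

theorem orElse_some_absorb {α : Type} (x : Option α) (a : α) :
    ((x.orElse (fun _ => some a)).orElse (fun _ => some a)) = x.orElse (fun _ => some a) := by
  cases x <;> rfl

theorem casc_cons (tc tl : String) (bt : Nat) (o : String) (r : List String) :
    casc tc tl bt (o :: r) =
      if altTier tc tl o < bt then (casc tc tl (altTier tc tl o) r).orElse (fun _ => some o)
      else casc tc tl bt r := by
  induction bt with
  | zero => simp [casc]
  | succ j ih =>
    by_cases hj : altTier tc tl o ≤ j
    · have hfind : auxFind tc tl j (o :: r) = some o := by
        simp [auxFind, hj]
      rcases Nat.lt_or_ge (altTier tc tl o) j with hlt | hge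
      · rw [casc, ih, hfind]
        simp only [hlt, if_pos, Nat.lt_succ_of_le hj, orElse_some_absorb]
      · have hej : altTier tc tl o = j := Nat.le_antisymm hj hge
        rw [casc, ih, hfind]
        simp [hej]
    · have hgt : j < altTier tc tl o := Nat.lt_of_not_le hj
      have hfind : auxFind tc tl j (o :: r) = auxFind tc tl j r := by
        simp [auxFind, Nat.not_le.mpr hgt]
      rw [casc, ih, if_neg (Nat.not_lt.mpr (Nat.le_of_lt hgt)), hfind,
        if_neg (Nat.not_lt.mpr (Nat.succ_le_of_lt hgt))]
      rfl

-- B's loop computes the cascade, with the accumulator as default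
theorem altLoop_eq_casc (tc tl : String) (opts : List String) (best : Option String) (bt : Nat) :
    altLoop tc tl opts best bt = (casc tc tl bt opts).getD (best.getD tc) := by
  induction opts generalizing best bt with
  | nil => simp [altLoop, casc_nil]
  | cons o r ih =>
    rw [altLoop]
    by_cases hlt : altTier tc tl o < bt
    · rw [if_pos hlt, casc_cons, if_pos hlt]
      by_cases h0 : altTier tc tl o = 0
      · simp [h0, casc, Option.orElse]
      · rw [if_neg (by simpa using h0), ih]
        cases casc tc tl (altTier tc tl o) r <;> simp [Option.orElse]
    · rw [if_neg hlt, casc_cons, if_neg hlt, ih]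

-- tier nesting facts (Chars level): equality ⇒ prefix ⇒ lowercased substring
theorem chars_startswith_self (l : List Char) : PySem.Chars.startswith l l = true :=
  (PySem.Chars.startswith_iff l l).mpr (List.prefix_refl l)

theorem lower_prefix_isIn (s p : List Char) (h : p <+: s) :
    PySem.Chars.isIn (PySem.Chars.lower p) (PySem.Chars.lower s) = true := by
  rw [PySem.Chars.isIn_iff_infix]
  exact (h.map PySem.Chars.lowerChar).isInfix

-- predicate of A's first scan = "tier ≤ 0"
theorem pred0_eq (tc o : String) :
    (tc == o) = decide (altTier tc (PySem.Str.lower tc) o ≤ 0) := by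
  unfold altTier; split_ifs with h1 h2 h3 <;> simp_all

-- predicate of A's second scan = "tier ≤ 1"
theorem pred1_eq (tc o : String) :
    (PySem.Str.startswith o tc || PySem.Str.startswith tc o)
      = decide (altTier tc (PySem.Str.lower tc) o ≤ 1) := by
  unfold altTier
  split_ifs with h1 h2 h3
  · have he : tc = o := by simpa using h1
    subst he; simp [chars_startswith_self]
  · simpa using h2
  · simp_all
  · simp_all

-- predicate of A's third scan = "tier ≤ 2"
theorem pred2_eq (tc o : String) :
    (PySem.Str.isIn (PySem.Str.lower tc) (PySem.Str.lower o) ||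
     PySem.Str.isIn (PySem.Str.lower o) (PySem.Str.lower tc))
      = decide (altTier tc (PySem.Str.lower tc) o ≤ 2) := by
  unfold altTier
  split_ifs with h1 h2 h3
  · have he : tc = o := by simpa using h1
    subst he; simp [lower_prefix_isIn tc.toList tc.toList (List.prefix_refl _)]
  · rcases Bool.or_eq_true_iff.mp h2 with h | h
    · have hp : tc.toList <+: o.toList := by
        simpa [PySem.Chars.startswith_iff] using h
      simp [lower_prefix_isIn o.toList tc.toList hp]
    · have hp : o.toList <+: tc.toList := by
        simpa [PySem.Chars.startswith_iff] using h
      simp [lower_prefix_isIn tc.toList o.toList hp]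
  · simpa using h3
  · simp_all

-- every tier is ≤ 3, so A's fallback head is found by the "tier ≤ 3" scan
theorem tier_le_three (tc tl o : String) : altTier tc tl o ≤ 3 := by
  unfold altTier; split_ifs <;> omega

theorem find?_ext {α : Type} (p q : α → Bool) (l : List α) (h : ∀ a, p a = q a) :
    l.find? p = l.find? q := by
  rw [funext h]

-- ===== VERDICT (by name: the statement is the Claim_ definition above) =====
theorem match_to_option_spec : Claim_equal_match_to_option := by
  intro text cos _
  unfold Spec_match_to_option
  simp only [match_to_option, match_to_option_alt]
  rw [altLoop_eq_casc]
  have e0 : cos.find? (fun opt => PySem.Str.strip text == opt)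
      = auxFind (PySem.Str.strip text) (PySem.Str.lower (PySem.Str.strip text)) 0 cos := by
    exact find?_ext _ _ cos (fun o => pred0_eq (PySem.Str.strip text) o)
  have e1 : cos.find? (fun opt =>
        PySem.Str.startswith opt (PySem.Str.strip text) || PySem.Str.startswith (PySem.Str.strip text) opt)
      = auxFind (PySem.Str.strip text) (PySem.Str.lower (PySem.Str.strip text)) 1 cos := by
    exact find?_ext _ _ cos (fun o => pred1_eq (PySem.Str.strip text) o)
  have e2 : cos.find? (fun opt =>
        PySem.Str.isIn (PySem.Str.lower (PySem.Str.strip text)) (PySem.Str.lower opt) ||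
        PySem.Str.isIn (PySem.Str.lower opt) (PySem.Str.lower (PySem.Str.strip text)))
      = auxFind (PySem.Str.strip text) (PySem.Str.lower (PySem.Str.strip text)) 2 cos := by
    exact find?_ext _ _ cos (fun o => pred2_eq (PySem.Str.strip text) o)
  rw [e0, e1, e2]
  simp only [casc, Option.getD_none]
  cases h0 : auxFind (PySem.Str.strip text) (PySem.Str.lower (PySem.Str.strip text)) 0 cos with
  | some o => simp [Option.orElse]
  | none =>
    cases h1 : auxFind (PySem.Str.strip text) (PySem.Str.lower (PySem.Str.strip text)) 1 cos with
    | some o => simp [Option.orElse]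
    | none =>
      cases h2 : auxFind (PySem.Str.strip text) (PySem.Str.lower (PySem.Str.strip text)) 2 cos with
      | some o => simp [Option.orElse]
      | none =>
        cases cos with
        | nil => simp [auxFind, Option.orElse]
        | cons o r => simp [auxFind, tier_le_three, Option.orElse]
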